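-- pv_equiv track=rewrite | github.com/AbdulAidil/CP125-Class-Repo | labs/lab04/exercise5/exercise5.py | find_momentum_days
-- ===== SOURCE A (Python) =====
-- def find_momentum_days(prices):
--     momentum_days = []
--     for i in range(2, len(prices)):
--         today_change = prices[i] - prices[i - 1]
--         yesterday_change = prices[i - 1] - prices[i - 2]
--         if today_change > 0 and today_change > yesterday_change:
--             momentum_days.append(i)
--     return momentum_days
-- ===== SOURCE B (Python) =====
-- def find_momentum_days(prices):
--     # Set-algebra decomposition: a momentum day is a rising day (price up) that is
--     # also convex (second difference positive); build the two index sets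
--     # independently and return the sorted intersection.
--     n = len(prices)
--     rising = {i for i in range(1, n) if prices[i] > prices[i - 1]}
--     convex = {i for i in range(2, n) if prices[i] + prices[i - 2] > 2 * prices[i - 1]}
--     return sorted(rising & convex)
-- ===== Notes on version B (the rewrite author's own statement) =====
-- stated objective: alternative
-- what changed: A's single index loop testing a three-element window is replaced by a set-algebra decomposition: build the set of rising days and the set of convex days (positive second difference, an algebraic rewrite of 'change greater than yesterday's change') independently, intersect the two sets and return the sorted intersection.
import Mathlib
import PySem

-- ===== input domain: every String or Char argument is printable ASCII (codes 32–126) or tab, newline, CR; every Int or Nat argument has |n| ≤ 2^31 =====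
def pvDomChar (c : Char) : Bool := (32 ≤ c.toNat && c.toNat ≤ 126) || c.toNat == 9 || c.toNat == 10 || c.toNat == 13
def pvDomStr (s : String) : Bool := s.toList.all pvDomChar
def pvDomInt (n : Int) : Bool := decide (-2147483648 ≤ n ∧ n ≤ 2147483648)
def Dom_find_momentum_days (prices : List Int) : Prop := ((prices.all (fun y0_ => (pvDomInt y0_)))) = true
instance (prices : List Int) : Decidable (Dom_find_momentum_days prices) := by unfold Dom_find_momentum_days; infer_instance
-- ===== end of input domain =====

-- B replaces A's single three-element-window index loop by a set-algebra decomposition: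
-- build the set of rising days and the set of convex (positive second difference) days
-- independently, intersect them and sort; same asymptotic cost, different algorithm.

-- ===== PORT A =====
-- index loop over range(2, len(prices)); the indices i, i-1, i-2 are always in range there,
-- so pyGetD with default 0 is exact (the default is never reachable).
def find_momentum_days (prices : List Int) : List Int :=
  (PySem.List.pyRange 2 (prices.length : Int) 1).foldl
    (fun acc i =>
      let today_change := PySem.List.pyGetD prices i 0 - PySem.List.pyGetD prices (i - 1) 0
      let yesterday_change := PySem.List.pyGetD prices (i - 1) 0 - PySem.List.pyGetD prices (i - 2) 0
      if today_change > 0 ∧ today_change > yesterday_change then acc ++ [i] else acc) []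

-- ===== PORT B =====
-- two set comprehensions over ranges (indices in range there, so pyGetD is exact),
-- intersection, then sorted(); the result is order-independent, so PySem.Set is exact.
def find_momentum_days_alt (prices : List Int) : List Int :=
  let n : Int := (prices.length : Int)
  let rising : PySem.Set Int := PySem.Set.ofList
    ((PySem.List.pyRange 1 n 1).filter
      (fun i => decide (PySem.List.pyGetD prices i 0 > PySem.List.pyGetD prices (i - 1) 0)))
  let convex : PySem.Set Int := PySem.Set.ofList
    ((PySem.List.pyRange 2 n 1).filter
      (fun i => decide (PySem.List.pyGetD prices i 0 + PySem.List.pyGetD prices (i - 2) 0 >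
        2 * PySem.List.pyGetD prices (i - 1) 0)))
  PySem.List.sorted (PySem.Set.inter rising convex) (fun x => x) false

-- ===== PRECONDITION & SPEC =====
def Spec_find_momentum_days (prices : List Int) (out : List Int) : Prop := out = find_momentum_days_alt prices
instance (prices : List Int) (out : List Int) : Decidable (Spec_find_momentum_days prices out) := by unfold Spec_find_momentum_days; infer_instance

-- ===== CLAIM (what is proved, stated in full; the proofs are below) =====
def Claim_equal_find_momentum_days : Prop := ∀ (prices : List Int), Dom_find_momentum_days prices → Spec_find_momentum_days prices (find_momentum_days prices)

-- ===== LEMMAS AND PROOFS =====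

-- the momentum condition at price index k+2, read off with getD (indices always in range where used)
def pvCondAt (prices : List Int) (k : Nat) : Bool :=
  decide (prices.getD (k + 2) 0 - prices.getD (k + 1) 0 > 0 ∧
    prices.getD (k + 2) 0 - prices.getD (k + 1) 0 > prices.getD (k + 1) 0 - prices.getD k 0)

-- common normal form of both ports
def pvNF (prices : List Int) : List Int :=
  ((List.range (prices.length - 2)).filter (fun k => pvCondAt prices k)).map
    (fun k : Nat => (k : Int) + 2)

theorem pvA_eq_NF (prices : List Int) : find_momentum_days prices = pvNF prices := by
  have hlen : (((prices.length : Int)) - 2).toNat = prices.length - 2 := by omega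
  simp only [find_momentum_days, PySem.List.pyRange_one, List.foldl_map, hlen,
    PySem.List.foldl_append_ite, List.nil_append]
  have hc : ∀ k ∈ List.range (prices.length - 2),
      (decide (PySem.List.pyGetD prices (2 + (k : Int)) 0 - PySem.List.pyGetD prices (2 + (k : Int) - 1) 0 > 0 ∧
        PySem.List.pyGetD prices (2 + (k : Int)) 0 - PySem.List.pyGetD prices (2 + (k : Int) - 1) 0 >
          PySem.List.pyGetD prices (2 + (k : Int) - 1) 0 - PySem.List.pyGetD prices (2 + (k : Int) - 2) 0))
      = pvCondAt prices k := by
    intro k _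
    have e2 : (2 : Int) + (k : Int) = ((k + 2 : Nat) : Int) := by push_cast; ring
    have e1' : ((k + 2 : Nat) : Int) - 1 = ((k + 1 : Nat) : Int) := by push_cast; ring
    have e0' : ((k + 2 : Nat) : Int) - 2 = ((k : Nat) : Int) := by push_cast; ring
    rw [e2, e1', e0', PySem.List.pyGetD_natCast, PySem.List.pyGetD_natCast, PySem.List.pyGetD_natCast,
      pvCondAt]
  rw [List.filter_congr hc]
  unfold pvNF
  exact List.map_congr_left (fun k _ => by ring)

-- the two comprehension lists of B, named for the proof
def pvRL (prices : List Int) : List Int :=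
  (PySem.List.pyRange 1 (prices.length : Int) 1).filter
    (fun i => decide (PySem.List.pyGetD prices i 0 > PySem.List.pyGetD prices (i - 1) 0))

def pvCL (prices : List Int) : List Int :=
  (PySem.List.pyRange 2 (prices.length : Int) 1).filter
    (fun i => decide (PySem.List.pyGetD prices i 0 + PySem.List.pyGetD prices (i - 2) 0 >
      2 * PySem.List.pyGetD prices (i - 1) 0))

-- pvNF is strictly increasing
theorem pvNF_pairwise (prices : List Int) : (pvNF prices).Pairwise (· < ·) := by
  unfold pvNF
  have h : (List.filter (fun k => pvCondAt prices k) (List.range (prices.length - 2))).Pairwise (· < ·) :=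
    (List.pairwise_lt_range).filter _
  exact h.map _ (fun {a b} hab => by omega)

-- membership in pvNF
theorem mem_pvNF (prices : List Int) (x : Int) :
    x ∈ pvNF prices ↔ ∃ k : Nat, k < prices.length - 2 ∧ pvCondAt prices k = true ∧ x = (k : Int) + 2 := by
  unfold pvNF
  simp only [List.mem_map, List.mem_filter, List.mem_range]
  constructor
  · rintro ⟨k, ⟨hk, hc⟩, rfl⟩; exact ⟨k, hk, hc, rfl⟩
  · rintro ⟨k, hk, hc, rfl⟩; exact ⟨k, ⟨hk, hc⟩, rfl⟩

theorem pvB_eq_NF (prices : List Int) : find_momentum_days_alt prices = pvNF prices := by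
  have hB : find_momentum_days_alt prices =
      PySem.List.sorted (PySem.Set.inter (PySem.Set.ofList (pvRL prices)) (PySem.Set.ofList (pvCL prices)))
        (fun x => x) false := rfl
  have hrlp : (pvRL prices).Pairwise (· < ·) :=
    (PySem.List.pairwise_lt_pyRange_one 1 (prices.length : Int)).filter _
  have hclp : (pvCL prices).Pairwise (· < ·) :=
    (PySem.List.pairwise_lt_pyRange_one 2 (prices.length : Int)).filter _
  have hrln : (pvRL prices).Nodup := hrlp.imp (fun h => ne_of_lt h)
  have hcln : (pvCL prices).Nodup := hclp.imp (fun h => ne_of_lt h)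
  rw [hB, PySem.Set.ofList_eq_self_of_nodup _ hrln, PySem.Set.ofList_eq_self_of_nodup _ hcln]
  set rl := pvRL prices with hrl0
  set cl := pvCL prices with hcl0
  -- the intersection is a filter of rl, hence strictly increasing and nodup
  have hLp : (PySem.Set.inter rl cl).Pairwise (· < ·) := hrlp.filter _
  have hLn : (PySem.Set.inter rl cl).Nodup := hLp.imp (fun h => ne_of_lt h)
  -- membership in the intersection matches membership in pvNF
  have hmem : ∀ x : Int, x ∈ PySem.Set.inter rl cl ↔ x ∈ pvNF prices := by
    intro x
    rw [PySem.Set.mem_inter, mem_pvNF, hrl0, hcl0]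
    simp only [pvRL, pvCL, List.mem_filter, PySem.List.mem_pyRange_one, decide_eq_true_eq]
    constructor
    · rintro ⟨⟨⟨h1, h1n⟩, hr⟩, ⟨⟨h2, _⟩, hc⟩⟩
      refine ⟨(x - 2).toNat, by omega, ?_, by omega⟩
      have e2 : x = (((x - 2).toNat + 2 : Nat) : Int) := by omega
      rw [e2] at hr hc
      have e1 : ((((x - 2).toNat + 2 : Nat)) : Int) - 1 = (((x - 2).toNat + 1 : Nat) : Int) := by
        push_cast; ring
      have e0 : ((((x - 2).toNat + 2 : Nat)) : Int) - 2 = (((x - 2).toNat : Nat) : Int) := by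
        push_cast; ring
      rw [e1] at hr
      rw [e1, e0] at hc
      rw [PySem.List.pyGetD_natCast, PySem.List.pyGetD_natCast] at hr
      rw [PySem.List.pyGetD_natCast, PySem.List.pyGetD_natCast, PySem.List.pyGetD_natCast] at hc
      unfold pvCondAt
      simp only [decide_eq_true_eq]
      omega
    · rintro ⟨k, hk, hc, rfl⟩
      unfold pvCondAt at hc
      simp only [decide_eq_true_eq] at hc
      have e2 : (k : Int) + 2 = ((k + 2 : Nat) : Int) := by push_cast; ring
      rw [e2]
      have e1 : (((k + 2 : Nat)) : Int) - 1 = ((k + 1 : Nat) : Int) := by push_cast; ring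
      have e0 : (((k + 2 : Nat)) : Int) - 2 = ((k : Nat) : Int) := by push_cast; ring
      rw [e1, e0, PySem.List.pyGetD_natCast, PySem.List.pyGetD_natCast, PySem.List.pyGetD_natCast]
      refine ⟨⟨⟨by push_cast; omega, by push_cast; omega⟩, by omega⟩,
        ⟨by push_cast; omega, by push_cast; omega⟩, by omega⟩
  -- pvNF is a permutation of the intersection, and strictly increasing: it names sorted()
  have hperm : (pvNF prices).Perm (PySem.Set.inter rl cl) := by
    apply List.perm_of_nodup_nodup_toFinset_eq
    · exact (pvNF_pairwise prices).imp (fun h => ne_of_lt h)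
    · exact hLn
    · ext x; simp only [List.mem_toFinset]; exact (hmem x).symm
  exact PySem.List.sorted_eq_of_perm_of_pairwise_lt _ _ _ hperm (pvNF_pairwise prices)

-- ===== VERDICT (by name: the statement is the Claim_ definition above) =====
theorem find_momentum_days_spec : Claim_equal_find_momentum_days := by
  intro prices _
  show _ = _
  rw [pvA_eq_NF, pvB_eq_NF]
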